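-- pv_equiv track=rewrite | github.com/Iqx-nwafu/Optimalisering-van-besproeiingstelsels | eval_one.py | actions_to_groups
-- ===== SOURCE A (Python) =====
-- def actions_to_groups(actions, lateral_ids, group_size=4):
--     """把 120 个 action index 映射为 30 组×4条支管的 lateral_id 列表。"""
--     assert len(actions) % group_size == 0
--     G = len(actions) // group_size
--     groups = []
--     for g in range(G):
--         idxs = actions[group_size * g: group_size * g + group_size]
--         groups.append([lateral_ids[i] for i in idxs])
--     return groups
-- ===== SOURCE B (Python) =====
-- def actions_to_groups(actions, lateral_ids, group_size=4):
--     """把 120 个 action index 映射为 30 组×4条支管的 lateral_id 列表。"""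
--     assert len(actions) % group_size == 0
--     it = iter(actions)
--     return [[lateral_ids[i] for i in chunk] for chunk in zip(*[it] * group_size)]
-- ===== Notes on version B (the rewrite author's own statement) =====
-- stated objective: alternative
-- what changed: Replaces A's index-arithmetic loop (per-group slice bounds computed from len//group_size) by iterator-based chunking with zip(*[it]*group_size), then one lookup comprehension per chunk; no division or slice indices at all.
import Mathlib
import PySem

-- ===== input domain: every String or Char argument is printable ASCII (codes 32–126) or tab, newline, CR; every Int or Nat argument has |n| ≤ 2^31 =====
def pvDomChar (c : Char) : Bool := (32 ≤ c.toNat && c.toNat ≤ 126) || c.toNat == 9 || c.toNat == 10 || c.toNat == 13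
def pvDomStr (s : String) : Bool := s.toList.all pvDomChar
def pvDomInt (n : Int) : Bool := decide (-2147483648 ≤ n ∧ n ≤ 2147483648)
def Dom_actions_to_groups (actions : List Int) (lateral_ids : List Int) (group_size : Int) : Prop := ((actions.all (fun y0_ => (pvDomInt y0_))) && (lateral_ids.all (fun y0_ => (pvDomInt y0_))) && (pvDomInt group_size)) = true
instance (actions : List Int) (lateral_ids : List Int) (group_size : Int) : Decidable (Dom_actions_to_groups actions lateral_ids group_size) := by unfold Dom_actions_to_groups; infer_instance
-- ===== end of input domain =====

-- B replaces A's index-arithmetic loop (slice bounds from len//group_size) by iterator-style chunking of actions, then one lookup pass per chunk.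


-- ===== PORT A =====
-- literal port of A: G = len(actions)//group_size; per group g, slice the index block and look each index up
def actions_to_groups (actions : List Int) (lateral_ids : List Int) (group_size : Int) : List (List Int) :=
  let G := PySem.Int.floordiv (actions.length : Int) group_size
  (PySem.List.pyRange 0 G 1).foldl
    (fun groups g =>
      let idxs := PySem.List.slice actions (some (group_size * g)) (some (group_size * g + group_size))
      groups ++ [idxs.map (fun i => PySem.List.pyGetD lateral_ids i 0)])  -- lateral_ids[i]; Pre_ keeps i in range
    []

-- ===== PORT B =====
-- zip(*[it] * group_size): successive full chunks of group_size elements (none when group_size ≤ 0)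
def pyZipChunks {α : Type} (g : Nat) (xs : List α) : List (List α) :=
  if _h : 0 < g ∧ g ≤ xs.length then
    xs.take g :: pyZipChunks g (xs.drop g)
  else []
termination_by xs.length
decreasing_by simp; omega

-- literal port of B: chunk the action indices by iterator, then one lookup comprehension per chunk
def actions_to_groups_alt (actions : List Int) (lateral_ids : List Int) (group_size : Int) : List (List Int) :=
  (pyZipChunks group_size.toNat actions).map
    (fun chunk => chunk.map (fun i => PySem.List.pyGetD lateral_ids i 0))  -- lateral_ids[i]; Pre_ keeps i in range

-- ===== PRECONDITION & SPEC =====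
-- Pre_ excludes exactly the inputs where A raises: ZeroDivisionError for group_size = 0, AssertionError when
-- len(actions) % group_size ≠ 0, and IndexError on an out-of-range action index when group_size > 0
-- (with group_size < 0 no index is ever used: A returns []).
def Pre_actions_to_groups (actions : List Int) (lateral_ids : List Int) (group_size : Int) : Prop :=
  group_size ≠ 0 ∧ PySem.Int.mod (actions.length : Int) group_size = 0 ∧
  (0 < group_size → ∀ i ∈ actions, PySem.Raise.InRange lateral_ids.length i)
instance (actions : List Int) (lateral_ids : List Int) (group_size : Int) : Decidable (Pre_actions_to_groups actions lateral_ids group_size) := by unfold Pre_actions_to_groups; infer_instance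

def pvWitness_actions_to_groups : List Int × List Int × Int := ([0, 1, 1, 0], [10, 20], 2)

def Spec_actions_to_groups (actions : List Int) (lateral_ids : List Int) (group_size : Int) (out : List (List Int)) : Prop := out = actions_to_groups_alt actions lateral_ids group_size
instance (actions : List Int) (lateral_ids : List Int) (group_size : Int) (out : List (List Int)) : Decidable (Spec_actions_to_groups actions lateral_ids group_size out) := by unfold Spec_actions_to_groups; infer_instance

-- ===== CLAIM (what is proved, stated in full; the proofs are below) =====
def Claim_equal_actions_to_groups : Prop := ∀ (actions : List Int) (lateral_ids : List Int) (group_size : Int), Dom_actions_to_groups actions lateral_ids group_size → Pre_actions_to_groups actions lateral_ids group_size → Spec_actions_to_groups actions lateral_ids group_size (actions_to_groups actions lateral_ids group_size)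

-- ===== LEMMAS AND PROOFS =====

-- A's g-th slice, written with Nat bounds, is the g-th chunk: the whole indexed loop is pyZipChunks
theorem range_slice_eq_pyZipChunks {α : Type} (g : Nat) (hg : 0 < g) :
    ∀ (n : Nat) (xs : List α), xs.length = n * g →
      (List.range n).map (fun k => (xs.drop (g * k)).take g) = pyZipChunks g xs := by
  intro n
  induction n with
  | zero =>
    intro xs hlen
    rw [pyZipChunks, dif_neg (by rw [Nat.zero_mul] at hlen; omega)]
    simp
  | succ m ih =>
    intro xs hlen
    rw [pyZipChunks, dif_pos ⟨hg, by rw [hlen]; exact Nat.le_mul_of_pos_left g (by omega)⟩]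
    rw [List.range_succ_eq_map]
    simp only [List.map_cons, Nat.mul_zero, List.drop_zero, List.map_map]
    congr 1
    rw [← ih (xs.drop g) (by rw [List.length_drop, hlen, Nat.succ_mul]; omega)]
    apply List.map_congr_left
    intro k _
    simp only [Function.comp_apply, List.drop_drop]
    congr 2
    rw [Nat.mul_succ]
    omega

-- ===== VERDICT (by name: the statement is the Claim_ definition above) =====
theorem actions_to_groups_spec : Claim_equal_actions_to_groups := by
  unfold Claim_equal_actions_to_groups
  intro actions lateral_ids gs _hdom ⟨hgs, hmod, _hin⟩
  unfold Spec_actions_to_groups actions_to_groups actions_to_groups_alt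
  rw [PySem.List.foldl_append_singleton_eq_map]
  simp only [List.nil_append]
  rcases lt_trichotomy gs 0 with hneg | hzero | hpos
  · -- negative group_size: A's range(G) is empty, B has no full chunk
    have hG : PySem.Int.floordiv (actions.length : Int) gs ≤ 0 := by
      have h1 := PySem.Int.floordiv_mul_add_mod (actions.length : Int) gs
      have h2 := (PySem.Int.mod_neg_bounds (a := (actions.length : Int)) hneg).2
      by_contra h
      push Not at h
      have : PySem.Int.floordiv (actions.length : Int) gs * gs < 0 :=
        mul_neg_of_pos_of_neg h hneg
      have hlen : (0 : Int) ≤ (actions.length : Int) := Int.natCast_nonneg _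
      omega
    rw [PySem.List.pyRange_one_eq_nil hG]
    have : gs.toNat = 0 := by omega
    rw [this, pyZipChunks]
    simp
  · exact absurd hzero hgs
  · -- positive group_size: len = gs * q full groups either way
    have hdvd : gs ∣ (actions.length : Int) :=
      (PySem.Int.mod_eq_zero_iff_dvd _ _).mp hmod
    obtain ⟨q, hq⟩ := hdvd
    have hq0 : 0 ≤ q := by
      by_contra h
      push Not at h
      have : (actions.length : Int) < 0 := by
        calc (actions.length : Int) = gs * q := hq
        _ < 0 := mul_neg_of_pos_of_neg hpos h
      omega
    have hG : PySem.Int.floordiv (actions.length : Int) gs = q := by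
      rw [PySem.Int.floordiv_eq_ediv_of_pos hpos, hq]
      rw [Int.mul_ediv_cancel_left _ (ne_of_gt hpos)]
    rw [hG, PySem.List.pyRange_one 0 q]
    simp only [List.map_map, sub_zero]
    rw [← range_slice_eq_pyZipChunks gs.toNat (by omega) q.toNat actions
          (by
            have h1 : ((q.toNat * gs.toNat : Nat) : Int) = gs * q := by
              push_cast [Int.toNat_of_nonneg hq0, Int.toNat_of_nonneg hpos.le]
              ring
            omega)]
    simp only [List.map_map]
    apply List.map_congr_left
    intro k _
    simp only [Function.comp_apply, zero_add]
    have hcast : gs * (k : Int) = ((gs.toNat * k : Nat) : Int) := by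
      push_cast [Int.toNat_of_nonneg hpos.le]
      ring
    rw [hcast]
    have : ((gs.toNat * k : Nat) : Int) + gs = ((gs.toNat * k : Nat) : Int) + ((gs.toNat : Nat) : Int) := by omega
    rw [this, PySem.List.slice_natCast_add]
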